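-- pv_equiv track=rewrite | github.com/ewan/inventrry | pyinventrry/pyinventrry/util.py | seb_hash
-- ===== SOURCE A (Python) =====
-- def seb_hash( tab ) :
-- 	'''
-- 	Calculate the hash of a (+/-) array
-- 	:param tab: the array to hash
-- 	:type tab: String array
-- 	:return: the hash value
-- 	:rtype: int
-- 	'''
-- 	l = len(tab)
-- 	r = 1
-- 	for i in range(l) :
-- 		r = r*10
-- 		if tab[i] == '-':
-- 			r+=1
-- 	return r
-- ===== SOURCE B (Python) =====
-- def seb_hash(tab):
--     '''
--     Calculate the hash of a (+/-) array
--     :param tab: the array to hash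
--     :type tab: String array
--     :return: the hash value
--     :rtype: int
--     '''
--     return 10 ** len(tab) + sum(10 ** i for i, x in enumerate(reversed(tab)) if x == '-')
-- ===== Notes on version B (the rewrite author's own statement) =====
-- stated objective: idiomatic
-- what changed: Replaces the multiply-by-10-and-add Horner loop with a closed form: 10**len(tab) for the leading digit plus a positional sum of powers of 10 over the reversed list at the '-' positions.
import Mathlib
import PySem

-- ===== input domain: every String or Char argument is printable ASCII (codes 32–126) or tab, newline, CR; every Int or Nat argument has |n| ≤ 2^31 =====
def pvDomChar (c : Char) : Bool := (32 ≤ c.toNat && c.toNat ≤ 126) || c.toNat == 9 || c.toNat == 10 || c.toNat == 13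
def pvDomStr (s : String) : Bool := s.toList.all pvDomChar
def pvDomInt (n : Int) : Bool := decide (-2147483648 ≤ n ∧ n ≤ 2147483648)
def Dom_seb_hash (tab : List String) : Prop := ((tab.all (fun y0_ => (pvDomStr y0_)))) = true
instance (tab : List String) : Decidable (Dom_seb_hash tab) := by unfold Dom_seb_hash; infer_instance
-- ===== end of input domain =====

-- B replaces A's Horner multiply-by-10-and-add loop with a closed form (10^len plus a
-- positional sum of powers of 10 over the reversed list); objective: more idiomatic.

-- ===== PORT A =====
-- A's loop over range(len(tab)) reading tab[i] in order, with state r: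
def seb_hash (tab : List String) : Int :=
  tab.foldl (fun r s => let r2 := r * 10; if s = "-" then r2 + 1 else r2) 1

-- ===== PORT B =====
-- B: 10**len(tab) + sum(10**i for i, x in enumerate(reversed(tab)) if x == '-')
def seb_hash_alt (tab : List String) : Int :=
  (10 : Int) ^ tab.length +
    (PySem.List.enumerate tab.reverse 0).foldl
      (fun acc p => if p.2 = "-" then acc + (10 : Int) ^ p.1.toNat else acc) 0

-- ===== PRECONDITION & SPEC =====
def Spec_seb_hash (tab : List String) (out : Int) : Prop := out = seb_hash_alt tab
instance (tab : List String) (out : Int) : Decidable (Spec_seb_hash tab out) := by unfold Spec_seb_hash; infer_instance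

-- ===== CLAIM (what is proved, stated in full; the proofs are below) =====
def Claim_equal_seb_hash : Prop := ∀ (tab : List String), Dom_seb_hash tab → Spec_seb_hash tab (seb_hash tab)

-- ===== LEMMAS AND PROOFS =====

/-- Positional value of the '-' marks in `xs` (most-significant first). -/
def pvVal : List String → Int
  | [] => 0
  | x :: xs => (if x = "-" then (10 : Int) ^ xs.length else 0) + pvVal xs

/-- Positional value of the '-' marks in `ys` with powers starting at `s` (least-significant first). -/
def pvG : List String → Nat → Int
  | [], _ => 0
  | y :: ys, s => (if y = "-" then (10 : Int) ^ s else 0) + pvG ys (s + 1)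

theorem pvA_fold (xs : List String) (r : Int) :
    xs.foldl (fun r s => let r2 := r * 10; if s = "-" then r2 + 1 else r2) r
      = r * (10 : Int) ^ xs.length + pvVal xs := by
  induction xs generalizing r with
  | nil => simp [pvVal]
  | cons x xs ih =>
    simp only [List.foldl_cons, pvVal, List.length_cons]
    rw [ih]
    split_ifs <;> ring

theorem pvB_fold (ys : List String) (s : Nat) (acc : Int) :
    (PySem.List.enumerate ys (s : Int)).foldl
        (fun acc p => if p.2 = "-" then acc + (10 : Int) ^ p.1.toNat else acc) acc
      = acc + pvG ys s := by
  induction ys generalizing s acc with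
  | nil => simp [PySem.List.enumerate_nil, pvG]
  | cons y ys ih =>
    rw [PySem.List.enumerate_cons]
    simp only [List.foldl_cons, pvG]
    have hcast : ((s : Int) + 1) = ((s + 1 : Nat) : Int) := by push_cast; ring
    rw [hcast, ih]
    split_ifs <;> (try simp only [Int.toNat_natCast]) <;> ring

theorem pvG_append_singleton (as : List String) (x : String) (s : Nat) :
    pvG (as ++ [x]) s = pvG as s + (if x = "-" then (10 : Int) ^ (s + as.length) else 0) := by
  induction as generalizing s with
  | nil => simp [pvG]
  | cons a as ih =>
    simp only [List.cons_append, pvG, ih, List.length_cons]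
    rw [show s + 1 + as.length = s + (as.length + 1) from by omega]
    ring

theorem pvVal_eq_pvG_reverse (xs : List String) : pvVal xs = pvG xs.reverse 0 := by
  induction xs with
  | nil => simp [pvVal, pvG]
  | cons x xs ih =>
    simp only [pvVal, List.reverse_cons, pvG_append_singleton, ih, List.length_reverse]
    simp only [Nat.zero_add]
    ring

-- ===== VERDICT (by name: the statement is the Claim_ definition above) =====
theorem seb_hash_spec : Claim_equal_seb_hash := by
  intro tab _
  unfold Spec_seb_hash seb_hash seb_hash_alt
  rw [pvA_fold, pvVal_eq_pvG_reverse]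
  have h := pvB_fold tab.reverse 0 0
  simp only [Nat.cast_zero] at h
  rw [h]
  ring
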